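-- pv_equiv track=rewrite | github.com/wednesdaywoe/CoH-Planner | tools/convert_epic.py | extract_archetype_from_pool_name
-- ===== SOURCE A (Python) =====
-- def extract_archetype_from_pool_name(pool_name):
--     """Extract archetype from pool name prefix"""
--     # Common prefixes
--     prefixes = {
--         'blaster_': 'blaster',
--         'controller_': 'controller',
--         'defender_': 'defender',
--         'scrapper_': 'scrapper',
--         'tank_': 'tanker',
--         'brute_': 'brute',
--         'stalker_': 'stalker',
--         'dominator_': 'dominator',
--         'corruptor_': 'corruptor',
--         'mastermind_': 'mastermind',
--         'sentinel_': 'sentinel',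
--         'veat_': 'arachnos_soldier'  # VEAT pools work for both soldier/widow
--     }
--
--     for prefix, archetype in prefixes.items():
--         if pool_name.startswith(prefix):
--             return archetype
--
--     # Non-prefixed pools are typically for specific archetypes
--     # We'll determine from the first power's requires field
--     return None
-- ===== SOURCE B (Python) =====
-- def extract_archetype_from_pool_name(pool_name):
--     """Extract archetype from pool name prefix"""
--     i = pool_name.find('_')
--     if i < 0:
--         return None
--     head = pool_name[:i]
--     if head in ('blaster', 'controller', 'defender', 'scrapper', 'brute',
--                 'stalker', 'dominator', 'corruptor', 'mastermind', 'sentinel'):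
--         return head
--     if head == 'tank':
--         return 'tanker'
--     if head == 'veat':
--         return 'arachnos_soldier'
--     return None
-- ===== Notes on version B (the rewrite author's own statement) =====
-- stated objective: simpler
-- what changed: B drops the dict of underscored prefixes and the startswith scan: it cuts the token before the first underscore and branches on that token directly, returning the token itself for the ten archetypes whose pool prefix equals their name and handling tank/veat specially.
import Mathlib
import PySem

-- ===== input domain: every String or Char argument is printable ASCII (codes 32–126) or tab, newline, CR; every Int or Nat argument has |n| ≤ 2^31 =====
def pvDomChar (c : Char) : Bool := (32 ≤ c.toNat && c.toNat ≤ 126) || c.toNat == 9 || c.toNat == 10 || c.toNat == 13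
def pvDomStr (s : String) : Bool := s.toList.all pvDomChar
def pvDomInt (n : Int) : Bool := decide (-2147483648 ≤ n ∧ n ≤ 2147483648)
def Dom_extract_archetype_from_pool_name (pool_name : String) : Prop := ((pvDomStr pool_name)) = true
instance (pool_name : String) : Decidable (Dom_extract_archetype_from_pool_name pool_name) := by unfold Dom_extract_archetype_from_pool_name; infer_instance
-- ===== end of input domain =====

-- B drops A's dict of underscored prefixes and its startswith scan: it cuts the token before the first
-- underscore and decides directly from it, returning the token itself for the ten
-- archetypes whose pool prefix is their own name (simpler).

-- ===== PORT A =====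
-- the dict literal of A, iterated in insertion order by the for-loop
def pvPrefixesA : List (String × String) :=
  [("blaster_", "blaster"), ("controller_", "controller"), ("defender_", "defender"),
   ("scrapper_", "scrapper"), ("tank_", "tanker"), ("brute_", "brute"),
   ("stalker_", "stalker"), ("dominator_", "dominator"), ("corruptor_", "corruptor"),
   ("mastermind_", "mastermind"), ("sentinel_", "sentinel"), ("veat_", "arachnos_soldier")]

-- the for-loop over prefixes.items(): return archetype on first startswith hit, else fall through to None
def pvScanA (ps : List (String × String)) (pool_name : String) : Option String :=
  match ps with
  | [] => none
  | (prefix_, archetype) :: rest =>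
      if PySem.Str.startswith pool_name prefix_ then some archetype else pvScanA rest pool_name

def extract_archetype_from_pool_name (pool_name : String) : Option String :=
  pvScanA pvPrefixesA pool_name

-- ===== PORT B =====
-- the ten archetypes whose pool prefix is their own name (B's tuple literal)
def pvIdentityStems : List String :=
  ["blaster", "controller", "defender", "scrapper", "brute",
   "stalker", "dominator", "corruptor", "mastermind", "sentinel"]

def extract_archetype_from_pool_name_alt (pool_name : String) : Option String :=
  let i := PySem.Str.find pool_name "_"
  if i < 0 then none
  else
    let head := PySem.Str.slice pool_name none (some i)
    if pvIdentityStems.contains head then some head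
    else if head = "tank" then some "tanker"
    else if head = "veat" then some "arachnos_soldier"
    else none

-- ===== PRECONDITION & SPEC =====
def Spec_extract_archetype_from_pool_name (pool_name : String) (out : Option String) : Prop := out = extract_archetype_from_pool_name_alt pool_name
instance (pool_name : String) (out : Option String) : Decidable (Spec_extract_archetype_from_pool_name pool_name out) := by unfold Spec_extract_archetype_from_pool_name; infer_instance

-- ===== CLAIM (what is proved, stated in full; the proofs are below) =====
def Claim_equal_extract_archetype_from_pool_name : Prop := ∀ (pool_name : String), Dom_extract_archetype_from_pool_name pool_name → Spec_extract_archetype_from_pool_name pool_name (extract_archetype_from_pool_name pool_name)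

-- ===== LEMMAS AND PROOFS =====

-- a singleton list is an infix iff its element is a member
theorem pv_singleton_infix {α : Type} (a : α) (l : List α) : [a] <:+: l ↔ a ∈ l := by
  constructor
  · intro ⟨s, t, h⟩
    subst h; simp
  · intro h
    obtain ⟨s, t, h⟩ := List.append_of_mem h
    exact ⟨s, t, by simp [h]⟩

-- k ++ ['_'] is a prefix of t ++ '_' :: r (with '_' in neither k nor t) iff k = t
theorem pv_prefix_underscore (k t r : List Char) (hk : '_' ∉ k) (ht : '_' ∉ t) :
    (k ++ ['_']) <+: (t ++ '_' :: r) ↔ k = t := by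
  induction k generalizing t with
  | nil =>
      cases t with
      | nil => simp
      | cons c t' =>
          simp only [List.nil_append, List.cons_append, List.cons_prefix_cons]
          constructor
          · rintro ⟨h, -⟩
            exact absurd (h ▸ List.mem_cons_self) ht
          · intro h; exact absurd h (by simp)
  | cons a k' ih =>
      cases t with
      | nil =>
          simp only [List.nil_append, List.cons_append, List.cons_prefix_cons]
          constructor
          · rintro ⟨h, -⟩
            exact absurd (h ▸ List.mem_cons_self) hk
          · intro h; exact absurd h (by simp)
      | cons c t' =>
          have hk' : '_' ∉ k' := fun h => hk (List.mem_cons_of_mem _ h)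
          have ht' : '_' ∉ t' := fun h => ht (List.mem_cons_of_mem _ h)
          simp [List.cons_prefix_cons, ih t' hk' ht']

-- A's loop returns None when no prefix matches
theorem pv_scan_none (s : String) (ps : List (String × String))
    (h : ∀ p ∈ ps, PySem.Str.startswith s p.1 = false) : pvScanA ps s = none := by
  induction ps with
  | nil => rfl
  | cons hd tl ih =>
      obtain ⟨p, v⟩ := hd
      simp only [pvScanA, h (p, v) List.mem_cons_self]
      exact ih (fun q hq => h q (List.mem_cons_of_mem _ hq))

-- startswith against a key stem ++ "_" is deciding head = stem, when head is the text
-- before the first '_' of the input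
theorem pv_cond_eq (pool_name head k stem : String) (t r : List Char)
    (hL : pool_name.toList = t ++ '_' :: r) (ht : '_' ∉ t) (hhead : head.toList = t)
    (hk1 : k.toList = stem.toList ++ ['_']) (hk2 : '_' ∉ stem.toList) :
    PySem.Str.startswith pool_name k = (head == stem) := by
  rw [Bool.eq_iff_iff, beq_iff_eq]
  rw [PySem.Str.startswith_eq, PySem.Chars.startswith_iff, hk1, hL,
      pv_prefix_underscore _ t r hk2 ht]
  constructor
  · intro h
    apply String.toList_injective
    rw [hhead, h]
  · intro h
    rw [← hhead, h]

theorem pv_main (pool_name : String) :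
    extract_archetype_from_pool_name pool_name = extract_archetype_from_pool_name_alt pool_name := by
  unfold extract_archetype_from_pool_name extract_archetype_from_pool_name_alt
  have hfind : PySem.Str.find pool_name "_" = PySem.Chars.find pool_name.toList ['_'] := by
    simp [PySem.Str.find_eq]
  by_cases hneg : PySem.Str.find pool_name "_" = -1
  · -- no '_' in the input: every startswith test is false, B returns none
    simp only [hneg]
    have hnotin : '_' ∉ pool_name.toList := by
      rw [hfind] at hneg
      rw [PySem.Chars.find_eq_neg_one_iff] at hneg
      exact fun hm => hneg ((pv_singleton_infix _ _).mpr hm)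
    rw [if_pos (by norm_num)]
    apply pv_scan_none
    intro p hp
    have hmem : '_' ∈ p.1.toList := by
      fin_cases hp <;> decide
    rw [PySem.Str.startswith_eq]
    rw [Bool.eq_false_iff]
    intro hsw
    rw [PySem.Chars.startswith_iff] at hsw
    exact hnotin (hsw.sublist.mem hmem)
  · -- the first '_' is at index n; head is the text before it
    have h0 : 0 ≤ PySem.Chars.find pool_name.toList ['_'] := by
      rcases lt_or_ge (PySem.Chars.find pool_name.toList ['_']) 0 with h | h
      · exfalso; apply hneg
        rw [hfind]
        have := PySem.Chars.neg_one_le_find pool_name.toList ['_']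
        omega
      · exact h
    obtain ⟨hpre, hmin⟩ := PySem.Chars.find_spec h0
    set n := (PySem.Chars.find pool_name.toList ['_']).toNat with hn
    obtain ⟨r, hr⟩ := hpre
    simp only [List.singleton_append] at hr
    set t := pool_name.toList.take n with htdef
    have hL : pool_name.toList = t ++ '_' :: r := by
      rw [htdef, hr]
      exact (List.take_append_drop _ _).symm
    have ht : '_' ∉ t := by
      intro hm
      obtain ⟨j, hj, hget⟩ := List.getElem_of_mem hm
      have hjn : j < n := lt_of_lt_of_le hj (by simp [htdef])
      apply hmin j hjn
      have hjlen : j < pool_name.toList.length := by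
        have : t.length ≤ pool_name.toList.length := by simp [htdef]
        omega
      have hLj : pool_name.toList[j]'hjlen = '_' := by
        simp only [htdef, List.getElem_take] at hget
        exact hget
      refine ⟨pool_name.toList.drop (j + 1), ?_⟩
      rw [List.singleton_append, ← hLj]
      exact (List.drop_eq_getElem_cons hjlen).symm
    have hfn : PySem.Str.find pool_name "_" = (n : Int) := by
      rw [hfind, hn]
      omega
    have hnonneg : ¬ PySem.Str.find pool_name "_" < 0 := by omega
    simp only [hnonneg, if_false]
    set head := PySem.Str.slice pool_name none (some (PySem.Str.find pool_name "_")) with hheaddef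
    have hhead : head.toList = t := by
      rw [hheaddef, PySem.Str.toList_slice, PySem.Chars.slice_eq_listSlice, hfn,
          PySem.List.slice_to_natCast, htdef]
    have hc : ∀ p ∈ pvPrefixesA, ∀ stem : String, p.1.toList = stem.toList ++ ['_'] →
        '_' ∉ stem.toList → PySem.Str.startswith pool_name p.1 = (head == stem) :=
      fun p _ stem h1 h2 => pv_cond_eq pool_name head p.1 stem t r hL ht hhead h1 h2
    have c1 := hc ("blaster_", "blaster") (by simp [pvPrefixesA]) "blaster" (by decide) (by decide)
    have c2 := hc ("controller_", "controller") (by simp [pvPrefixesA]) "controller" (by decide) (by decide)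
    have c3 := hc ("defender_", "defender") (by simp [pvPrefixesA]) "defender" (by decide) (by decide)
    have c4 := hc ("scrapper_", "scrapper") (by simp [pvPrefixesA]) "scrapper" (by decide) (by decide)
    have c5 := hc ("tank_", "tanker") (by simp [pvPrefixesA]) "tank" (by decide) (by decide)
    have c6 := hc ("brute_", "brute") (by simp [pvPrefixesA]) "brute" (by decide) (by decide)
    have c7 := hc ("stalker_", "stalker") (by simp [pvPrefixesA]) "stalker" (by decide) (by decide)
    have c8 := hc ("dominator_", "dominator") (by simp [pvPrefixesA]) "dominator" (by decide) (by decide)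
    have c9 := hc ("corruptor_", "corruptor") (by simp [pvPrefixesA]) "corruptor" (by decide) (by decide)
    have c10 := hc ("mastermind_", "mastermind") (by simp [pvPrefixesA]) "mastermind" (by decide) (by decide)
    have c11 := hc ("sentinel_", "sentinel") (by simp [pvPrefixesA]) "sentinel" (by decide) (by decide)
    have c12 := hc ("veat_", "arachnos_soldier") (by simp [pvPrefixesA]) "veat" (by decide) (by decide)
    simp only [pvPrefixesA, pvScanA, c1, c2, c3, c4, c5, c6, c7, c8, c9, c10, c11, c12]
    by_cases h1 : head = "blaster"
    · simp [h1, pvIdentityStems]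
    by_cases h2 : head = "controller"
    · simp [h2, pvIdentityStems]
    by_cases h3 : head = "defender"
    · simp [h3, pvIdentityStems]
    by_cases h4 : head = "scrapper"
    · simp [h4, pvIdentityStems]
    by_cases h5 : head = "tank"
    · simp [h5, pvIdentityStems]
    by_cases h6 : head = "brute"
    · simp [h6, pvIdentityStems]
    by_cases h7 : head = "stalker"
    · simp [h7, pvIdentityStems]
    by_cases h8 : head = "dominator"
    · simp [h8, pvIdentityStems]
    by_cases h9 : head = "corruptor"
    · simp [h9, pvIdentityStems]
    by_cases h10 : head = "mastermind"
    · simp [h10, pvIdentityStems]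
    by_cases h11 : head = "sentinel"
    · simp [h11, pvIdentityStems]
    by_cases h12 : head = "veat"
    · simp [h12, pvIdentityStems]
    · simp [h1, h2, h3, h4, h5, h6, h7, h8, h9, h10, h11, h12, pvIdentityStems]

-- ===== VERDICT (by name: the statement is the Claim_ definition above) =====
theorem extract_archetype_from_pool_name_spec : Claim_equal_extract_archetype_from_pool_name := by
  intro pool_name _
  unfold Spec_extract_archetype_from_pool_name
  exact pv_main pool_name
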